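-- pv_equiv track=rewrite | github.com/davidzof/picoclaw | market_watch/market_watch.py | summarize_context_type
-- ===== SOURCE A (Python) =====
-- from typing import Any
--
-- def summarize_context_type(groups: list[dict[str, Any]]) -> str:
--     types = [g["type"] for g in groups]
--     if any(t in types for t in ("company_reuters", "company_context_reuters", "ticker_yahoo", "company_yahoo")):
--         return "company_specific"
--     if any(t in types for t in ("industry_reuters", "sector_reuters", "group_industry_reuters", "group_sector_reuters")):
--         return "sector_specific"
--     if "macro_reuters" in types:
--         return "macro"
--     return "mixed"
-- ===== SOURCE B (Python) =====
-- def summarize_context_type(groups: list[dict[str, str]]) -> str: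
--     rank = {
--         "company_reuters": 0, "company_context_reuters": 0, "ticker_yahoo": 0, "company_yahoo": 0,
--         "industry_reuters": 1, "sector_reuters": 1, "group_industry_reuters": 1, "group_sector_reuters": 1,
--         "macro_reuters": 2,
--     }
--     best = 3
--     for g in groups:
--         r = rank.get(g["type"], 3)
--         if r < best:
--             best = r
--     return ["company_specific", "sector_specific", "macro", "mixed"][best]
-- ===== Notes on version B (the rewrite author's own statement) =====
-- stated objective: alternative
-- what changed: Replaced the four separate membership scans over a rebuilt types list with one table-driven pass that tracks the minimum priority rank and maps it back to a category name.
import Mathlib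
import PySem

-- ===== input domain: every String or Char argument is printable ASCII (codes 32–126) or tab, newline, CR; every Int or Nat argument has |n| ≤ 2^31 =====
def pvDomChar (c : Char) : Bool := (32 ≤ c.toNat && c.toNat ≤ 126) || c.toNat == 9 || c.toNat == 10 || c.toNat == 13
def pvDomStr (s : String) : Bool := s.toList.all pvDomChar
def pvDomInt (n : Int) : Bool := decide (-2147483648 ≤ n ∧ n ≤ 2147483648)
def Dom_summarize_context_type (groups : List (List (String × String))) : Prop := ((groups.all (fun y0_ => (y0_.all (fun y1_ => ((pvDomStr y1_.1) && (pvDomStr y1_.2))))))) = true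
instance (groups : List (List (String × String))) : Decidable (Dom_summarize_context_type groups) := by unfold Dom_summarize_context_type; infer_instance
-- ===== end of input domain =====

-- B replaces A's four membership scans over a rebuilt types list with one table-driven
-- min-rank pass mapped back to a category name (alternative decomposition, same cost class).

-- ===== PORT A =====
def summarize_context_type (groups : List (List (String × String))) : String :=
  -- types = [g["type"] for g in groups]; under Pre_ every lookup succeeds (some _)
  let types : List (Option String) := groups.map (fun g => (PySem.Dict.mk g).get? "type")
  if ["company_reuters", "company_context_reuters", "ticker_yahoo", "company_yahoo"].any
      (fun t => types.contains (some t)) then "company_specific"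
  else if ["industry_reuters", "sector_reuters", "group_industry_reuters", "group_sector_reuters"].any
      (fun t => types.contains (some t)) then "sector_specific"
  else if types.contains (some "macro_reuters") then "macro"
  else "mixed"

-- ===== PORT B =====
def pvRankDict : PySem.Dict String Int := PySem.Dict.mk
  [("company_reuters", 0), ("company_context_reuters", 0), ("ticker_yahoo", 0), ("company_yahoo", 0),
   ("industry_reuters", 1), ("sector_reuters", 1), ("group_industry_reuters", 1), ("group_sector_reuters", 1),
   ("macro_reuters", 2)]

def summarize_context_type_alt (groups : List (List (String × String))) : String :=
  let best : Int := groups.foldl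
    (fun best g =>
      let r := pvRankDict.getD (((PySem.Dict.mk g).get? "type").getD "") 3
      if r < best then r else best) 3
  (PySem.List.pyGet? ["company_specific", "sector_specific", "macro", "mixed"] best).getD ""

-- ===== PRECONDITION & SPEC =====
-- Pre_ excludes inputs with a group missing the "type" key, on which the Python A raises KeyError.
def Pre_summarize_context_type (groups : List (List (String × String))) : Prop :=
  ∀ g ∈ groups, ((PySem.Dict.mk g).get? "type").isSome
instance (groups : List (List (String × String))) : Decidable (Pre_summarize_context_type groups) := by unfold Pre_summarize_context_type; infer_instance
def pvWitness_summarize_context_type : (List (List (String × String))) :=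
  [[("type", "macro_reuters")], [("type", "foo"), ("x", "y")]]

def Spec_summarize_context_type (groups : List (List (String × String))) (out : String) : Prop := out = summarize_context_type_alt groups
instance (groups : List (List (String × String))) (out : String) : Decidable (Spec_summarize_context_type groups out) := by unfold Spec_summarize_context_type; infer_instance

-- ===== CLAIM (what is proved, stated in full; the proofs are below) =====
def Claim_equal_summarize_context_type : Prop := ∀ (groups : List (List (String × String))), Dom_summarize_context_type groups → Pre_summarize_context_type groups → Spec_summarize_context_type groups (summarize_context_type groups)

-- ===== LEMMAS AND PROOFS =====

-- the rank B's loop assigns to a group (its defaulted "type" string looked up in the table)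
def pvRk (g : List (String × String)) : Int :=
  pvRankDict.getD (((PySem.Dict.mk g).get? "type").getD "") 3

lemma pvRank_cases (v : String) :
    pvRankDict.getD v 3 = 0 ∨ pvRankDict.getD v 3 = 1 ∨ pvRankDict.getD v 3 = 2 ∨ pvRankDict.getD v 3 = 3 := by
  unfold pvRankDict
  simp only [PySem.Dict.getD_eq_get?_getD, PySem.Dict.get?_mk_cons]
  repeat' split
  all_goals simp [PySem.Dict.get?]

lemma pvRank_eq_zero_iff (v : String) : pvRankDict.getD v 3 = 0 ↔
    ("company_reuters" = v ∨ "company_context_reuters" = v ∨ "ticker_yahoo" = v ∨ "company_yahoo" = v) := by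
  unfold pvRankDict
  simp only [PySem.Dict.getD_eq_get?_getD, PySem.Dict.get?_mk_cons]
  repeat' split
  all_goals simp_all [PySem.Dict.get?]

lemma pvRank_eq_one_iff (v : String) : pvRankDict.getD v 3 = 1 ↔
    ("industry_reuters" = v ∨ "sector_reuters" = v ∨ "group_industry_reuters" = v ∨ "group_sector_reuters" = v) := by
  unfold pvRankDict
  simp only [PySem.Dict.getD_eq_get?_getD, PySem.Dict.get?_mk_cons]
  repeat' split
  all_goals simp_all [PySem.Dict.get?]
  all_goals subst_vars
  all_goals decide

lemma pvRank_eq_two_iff (v : String) : pvRankDict.getD v 3 = 2 ↔ ("macro_reuters" = v) := by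
  unfold pvRankDict
  simp only [PySem.Dict.getD_eq_get?_getD, PySem.Dict.get?_mk_cons]
  repeat' split
  all_goals simp_all [PySem.Dict.get?]
  all_goals subst_vars
  all_goals decide

-- B's fold, abstracted
def pvFold (l : List (List (String × String))) (b : Int) : Int :=
  l.foldl (fun best g => if pvRk g < best then pvRk g else best) b

lemma pvRk_cases_g (g : List (String × String)) : pvRk g = 0 ∨ pvRk g = 1 ∨ pvRk g = 2 ∨ pvRk g = 3 :=
  pvRank_cases _

lemma pvStep_eq_min (g : List (String × String)) (b : Int) :
    (if pvRk g < b then pvRk g else b) = min b (pvRk g) := by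
  rcases lt_or_ge (pvRk g) b with h | h <;> simp [min_def, h]

lemma pvFold_eq_min (l : List (List (String × String))) :
    ∀ b : Int, b ≤ 3 → pvFold l b = min b (pvFold l 3) := by
  induction l with
  | nil =>
    intro b hb
    simp only [pvFold, List.foldl_nil]
    omega
  | cons g gs ih =>
    intro b hb
    have hle : pvRk g ≤ 3 := by rcases pvRk_cases_g g with h | h | h | h <;> omega
    simp only [pvFold, List.foldl_cons, pvStep_eq_min] at *
    rw [ih (min b (pvRk g)) (by omega), ih (min 3 (pvRk g)) (by omega)]
    omega

lemma pvFold3_char (l : List (List (String × String))) :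
    pvFold l 3 =
      if ∃ g ∈ l, pvRk g = 0 then 0
      else if ∃ g ∈ l, pvRk g = 1 then 1
      else if ∃ g ∈ l, pvRk g = 2 then 2
      else 3 := by
  induction l with
  | nil => simp [pvFold]
  | cons g gs ih =>
    have hle : pvRk g ≤ 3 := by rcases pvRk_cases_g g with h | h | h | h <;> omega
    have hstep : pvFold (g :: gs) 3 = pvFold gs (min 3 (pvRk g)) := by
      simp only [pvFold, List.foldl_cons, pvStep_eq_min]
    have hcons : pvFold (g :: gs) 3 = min (pvRk g) (pvFold gs 3) := by
      rw [hstep, pvFold_eq_min gs (min 3 (pvRk g)) (by omega)]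
      omega
    rw [hcons, ih]
    by_cases e0 : ∃ x ∈ gs, pvRk x = 0 <;>
    by_cases e1 : ∃ x ∈ gs, pvRk x = 1 <;>
    by_cases e2 : ∃ x ∈ gs, pvRk x = 2 <;>
    rcases pvRk_cases_g g with h | h | h | h <;>
    simp [List.mem_cons, e0, e1, e2, h]

lemma summarize_alt_char (groups : List (List (String × String))) :
    summarize_context_type_alt groups =
      if ∃ g ∈ groups, pvRk g = 0 then "company_specific"
      else if ∃ g ∈ groups, pvRk g = 1 then "sector_specific"
      else if ∃ g ∈ groups, pvRk g = 2 then "macro"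
      else "mixed" := by
  show (PySem.List.pyGet? _ (pvFold groups 3)).getD "" = _
  rw [pvFold3_char]
  split_ifs <;> rfl

lemma summarize_a_char (groups : List (List (String × String)))
    (hpre : Pre_summarize_context_type groups) :
    summarize_context_type groups =
      if ∃ g ∈ groups, pvRk g = 0 then "company_specific"
      else if ∃ g ∈ groups, pvRk g = 1 then "sector_specific"
      else if ∃ g ∈ groups, pvRk g = 2 then "macro"
      else "mixed" := by
  have key : ∀ (t : String) (g : List (String × String)), g ∈ groups →
      ((PySem.Dict.mk g).get? "type" = some t ↔ t = ((PySem.Dict.mk g).get? "type").getD "") := by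
    intro t g hg
    obtain ⟨v, hv⟩ := Option.isSome_iff_exists.mp (hpre g hg)
    rw [hv]; simp [eq_comm]
  unfold summarize_context_type
  have c0 : (["company_reuters", "company_context_reuters", "ticker_yahoo", "company_yahoo"].any
      (fun t => (groups.map (fun g => (PySem.Dict.mk g).get? "type")).contains (some t)) = true)
      ↔ ∃ g ∈ groups, pvRk g = 0 := by
    simp only [List.any_eq_true, List.contains_iff_mem, List.mem_map, pvRk, pvRank_eq_zero_iff]
    constructor
    · rintro ⟨t, ht, g, hg, hget⟩
      refine ⟨g, hg, ?_⟩
      have := (key t g hg).mp hget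
      fin_cases ht <;> simp_all
    · rintro ⟨g, hg, h | h | h | h⟩ <;>
        [exact ⟨"company_reuters", by simp, g, hg, (key _ g hg).mpr h⟩;
         exact ⟨"company_context_reuters", by simp, g, hg, (key _ g hg).mpr h⟩;
         exact ⟨"ticker_yahoo", by simp, g, hg, (key _ g hg).mpr h⟩;
         exact ⟨"company_yahoo", by simp, g, hg, (key _ g hg).mpr h⟩]
  have c1 : (["industry_reuters", "sector_reuters", "group_industry_reuters", "group_sector_reuters"].any
      (fun t => (groups.map (fun g => (PySem.Dict.mk g).get? "type")).contains (some t)) = true)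
      ↔ ∃ g ∈ groups, pvRk g = 1 := by
    simp only [List.any_eq_true, List.contains_iff_mem, List.mem_map, pvRk, pvRank_eq_one_iff]
    constructor
    · rintro ⟨t, ht, g, hg, hget⟩
      refine ⟨g, hg, ?_⟩
      have := (key t g hg).mp hget
      fin_cases ht <;> simp_all
    · rintro ⟨g, hg, h | h | h | h⟩ <;>
        [exact ⟨"industry_reuters", by simp, g, hg, (key _ g hg).mpr h⟩;
         exact ⟨"sector_reuters", by simp, g, hg, (key _ g hg).mpr h⟩;
         exact ⟨"group_industry_reuters", by simp, g, hg, (key _ g hg).mpr h⟩;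
         exact ⟨"group_sector_reuters", by simp, g, hg, (key _ g hg).mpr h⟩]
  have c2 : ((groups.map (fun g => (PySem.Dict.mk g).get? "type")).contains (some "macro_reuters") = true)
      ↔ ∃ g ∈ groups, pvRk g = 2 := by
    simp only [List.contains_iff_mem, List.mem_map, pvRk, pvRank_eq_two_iff]
    constructor
    · rintro ⟨g, hg, hget⟩
      exact ⟨g, hg, (key _ g hg).mp hget⟩
    · rintro ⟨g, hg, h⟩
      exact ⟨g, hg, (key _ g hg).mpr h⟩
  simp only [c0, c1, c2]

-- ===== VERDICT (by name: the statement is the Claim_ definition above) =====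
theorem summarize_context_type_spec : Claim_equal_summarize_context_type := by
  intro groups _ hpre
  unfold Spec_summarize_context_type
  rw [summarize_a_char groups hpre, summarize_alt_char groups]
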